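-- pv_equiv track=rewrite | github.com/moreiratrader/BeecrowdResolucoes | Iniciante - Python/1557 matriz quadrada 3.py | contr_matrix
-- ===== SOURCE A (Python) =====
-- def contr_matrix(n):
--     #     matriz = [[2 ** (i + j) for j in range(n)] for i in range(n)]
--     #     return matriz
--     matrix = []
--     for i in range(0, n):
--         row = []
--         for j in range(0, n):
--             number = 2** (i + j)
--             row.append(number)
--         matrix.append(row)
--     return matrix
-- ===== SOURCE B (Python) =====
-- def contr_matrix(n):
--     if n <= 0:
--         return []
--     row = []
--     v = 1
--     for _ in range(n):
--         row.append(v)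
--         v *= 2
--     matrix = [row]
--     for _ in range(n - 1):
--         row = [2 * x for x in row]
--         matrix.append(row)
--     return matrix
-- ===== Notes on version B (the rewrite author's own statement) =====
-- stated objective: alternative
-- what changed: Instead of an independent power computation per cell, B builds the first row with a running double and derives each subsequent row by doubling the previous row elementwise.
import Mathlib
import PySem

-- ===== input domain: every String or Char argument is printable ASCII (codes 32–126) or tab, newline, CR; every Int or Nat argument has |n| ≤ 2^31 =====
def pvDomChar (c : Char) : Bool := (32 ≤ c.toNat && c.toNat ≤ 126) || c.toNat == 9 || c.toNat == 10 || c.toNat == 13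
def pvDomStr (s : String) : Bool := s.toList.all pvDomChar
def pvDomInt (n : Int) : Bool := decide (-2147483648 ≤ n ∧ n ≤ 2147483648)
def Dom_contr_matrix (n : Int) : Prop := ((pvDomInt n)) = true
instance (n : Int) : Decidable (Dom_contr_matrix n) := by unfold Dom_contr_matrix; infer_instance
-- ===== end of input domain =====

-- B replaces the per-cell power computation by a running double for the first
-- row and elementwise doubling of the previous row for each further row (alternative decomposition).

-- ===== PORT A =====
-- 2 ** (i + j): i, j ≥ 0 here (both from range(0,n)), so `.toNat` is exact.
def contr_matrix (n : Int) : List (List Int) :=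
  (PySem.List.pyRange 0 n 1).foldl
    (fun matrix i =>
      matrix ++ [(PySem.List.pyRange 0 n 1).foldl
        (fun row j => row ++ [(2 : Int) ^ (i + j).toNat]) []]) []

-- ===== PORT B =====
-- first loop of Source B: row.append(v); v *= 2
def firstRowLoop : Nat → Int → List Int → List Int
  | 0, _, row => row
  | k+1, v, row => firstRowLoop k (v * 2) (row ++ [v])

-- second loop of Source B: row = [2*x for x in row]; matrix.append(row)
def doubleLoop : Nat → List Int → List (List Int) → List (List Int)
  | 0, _, m => m
  | k+1, row, m =>
    let row' := row.map (fun x => 2 * x)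
    doubleLoop k row' (m ++ [row'])

def contr_matrix_alt (n : Int) : List (List Int) :=
  if n ≤ 0 then []
  else
    let row := firstRowLoop n.toNat 1 []
    doubleLoop (n.toNat - 1) row [row]

-- ===== PRECONDITION & SPEC =====
def Spec_contr_matrix (n : Int) (out : List (List Int)) : Prop := out = contr_matrix_alt n
instance (n : Int) (out : List (List Int)) : Decidable (Spec_contr_matrix n out) := by unfold Spec_contr_matrix; infer_instance

-- ===== CLAIM =====
def Claim_equal_contr_matrix : Prop := ∀ (n : Int), Dom_contr_matrix n → Spec_contr_matrix n (contr_matrix n)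

-- ===== LEMMAS AND PROOFS =====

theorem foldl_append_singleton {α β : Type} (f : α → β) (l : List α) (init : List β) :
    l.foldl (fun acc x => acc ++ [f x]) init = init ++ l.map f := by
  induction l generalizing init with
  | nil => simp
  | cons a t ih => simp [List.foldl, ih]

theorem contr_matrix_char (n : Int) :
    contr_matrix n =
      (List.range n.toNat).map (fun i =>
        (List.range n.toNat).map (fun j => (2 : Int) ^ (i + j))) := by
  unfold contr_matrix
  rw [PySem.List.pyRange_one]
  simp only [sub_zero, zero_add]
  rw [foldl_append_singleton]
  simp only [List.nil_append, List.map_map]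
  apply List.map_congr_left
  intro i _
  simp only [Function.comp]
  rw [foldl_append_singleton]
  simp only [List.nil_append, List.map_map]
  apply List.map_congr_left
  intro j _
  simp only [Function.comp]
  have h : ((i : Int) + (j : Int)).toNat = i + j := by omega
  rw [h]

theorem firstRowLoop_char (k : Nat) (v : Int) (row : List Int) :
    firstRowLoop k v row = row ++ (List.range k).map (fun j => v * 2 ^ j) := by
  induction k generalizing v row with
  | zero => simp [firstRowLoop]
  | succ k ih =>
    rw [firstRowLoop, ih, List.range_succ_eq_map]
    simp [List.map_map, Function.comp, mul_comm, mul_assoc, pow_succ]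

theorem doubleLoop_char (k : Nat) (row : List Int) (m : List (List Int)) :
    doubleLoop k row m =
      m ++ (List.range k).map (fun t => row.map (fun x => 2 ^ (t + 1) * x)) := by
  induction k generalizing row m with
  | zero => simp [doubleLoop]
  | succ k ih =>
    rw [doubleLoop, ih, List.range_succ_eq_map]
    simp only [List.map_cons, List.map_map, List.append_assoc, List.singleton_append]
    congr 1
    congr 1
    apply List.map_congr_left
    intro t _
    apply List.map_congr_left
    intro x _
    simp only [Function.comp, Nat.succ_eq_add_one, pow_succ]
    ring

-- ===== VERDICT =====
theorem contr_matrix_spec : Claim_equal_contr_matrix := by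
  intro n _
  unfold Spec_contr_matrix contr_matrix_alt
  rw [contr_matrix_char]
  by_cases h : n ≤ 0
  · simp [h, Int.toNat_of_nonpos h]
  · simp only [h, if_false]
    rw [firstRowLoop_char, doubleLoop_char]
    simp only [List.nil_append, List.singleton_append]
    have hm : n.toNat = (n.toNat - 1) + 1 := by omega
    rw [hm, List.range_succ_eq_map]
    simp only [List.map_cons, List.map_map]
    congr 1
    · simp
    · apply List.map_congr_left
      intro t _
      simp only [Function.comp]
      congr 1
      · norm_num
      · apply List.map_congr_left
        intro j _
        simp only [Function.comp, Nat.succ_eq_add_one]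
        rw [pow_add]
        ring
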